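-- pv_equiv track=rewrite | github.com/MrSamuelLaw/CNC_TOOLBOX | CNC_TOOLBOX_DEV/wb/sherline_lathe/sw_2_linuxCNC_formatter.py | _get_search_index
-- ===== SOURCE A (Python) =====
-- def _get_search_index(command_string, line):
--
--     window_size = len(command_string)
--     bracket_count = 0
--
--     for i in range(0, len(line)):
--         if bracket_count:
--             if line[i] == ')':
--                 bracket_count += 1
--             else:
--                 pass
--         elif line[i] == '(':
--             bracket_count -= 1
--         if not bracket_count:
--             j = i + window_size
--             if line[i:j] == command_string:
--                 yield i
-- ===== SOURCE B (Python) =====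
-- def _get_search_index(command_string, line):
--     # One pass to mark positions outside parentheses, then jump between
--     # occurrences with C-level str.find instead of slicing at every index.
--     outside = []
--     inside = False
--     for ch in line:
--         if ch == ')':
--             inside = False
--         elif not inside and ch == '(':
--             inside = True
--         outside.append(not inside)
--     n = len(line)
--     i = line.find(command_string)
--     while 0 <= i < n:
--         if outside[i]:
--             yield i
--         i = line.find(command_string, i + 1)
-- ===== Notes on version B (the rewrite author's own statement) =====
-- stated objective: faster
-- what changed: Instead of slicing and comparing the command string at every index of the line, B precomputes a boolean outside-parentheses mask in one pass and then jumps directly between occurrences with str.find, filtering them by the mask.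
import Mathlib
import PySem

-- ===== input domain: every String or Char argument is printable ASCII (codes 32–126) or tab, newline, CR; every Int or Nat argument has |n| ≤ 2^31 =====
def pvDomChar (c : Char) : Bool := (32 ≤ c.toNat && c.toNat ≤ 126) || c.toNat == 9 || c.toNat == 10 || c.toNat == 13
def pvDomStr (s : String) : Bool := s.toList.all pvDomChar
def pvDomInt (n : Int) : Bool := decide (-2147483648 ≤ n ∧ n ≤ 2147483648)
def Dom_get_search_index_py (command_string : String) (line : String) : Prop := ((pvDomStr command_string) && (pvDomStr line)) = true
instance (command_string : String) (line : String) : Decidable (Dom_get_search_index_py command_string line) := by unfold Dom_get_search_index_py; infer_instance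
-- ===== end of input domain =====

-- B replaces A's per-index slice comparison by a one-pass outside-parentheses mask plus str.find jumps
-- between occurrences; the yielded index lists are proved equal on the whole domain (no Pre_).

-- ===== PORT A =====
def get_search_index_py (command_string : String) (line : String) : List Int :=
  let cmdL := command_string.toList
  let s := line.toList
  let window_size : Int := (cmdL.length : Int)
  ((PySem.List.pyRange 0 (s.length : Int) 1).foldl
    (fun (st : Int × List Int) (i : Int) =>
      let bc : Int :=
        if st.1 ≠ 0 then
          (if PySem.List.pyGetD s i ' ' = ')' then st.1 + 1 else st.1)
        else if PySem.List.pyGetD s i ' ' = '(' then st.1 - 1 else st.1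
      if bc = 0 then
        if PySem.List.slice s (some i) (some (i + window_size)) = cmdL then (bc, st.2 ++ [i])
        else (bc, st.2)
      else (bc, st.2))
    (0, [])).2

-- ===== PORT B =====
-- the while loop of Source B, ported with a fuel bound (fuel only makes the loop total; length+1 iterations suffice)
def pvAltLoop (cmdL s : List Char) (outside : List Bool) : Nat → Int → List Int
  | 0, _ => []
  | fuel + 1, i =>
      if 0 ≤ i ∧ i < (s.length : Int) then
        (if outside.getD i.toNat false then [i] else []) ++
          pvAltLoop cmdL s outside fuel (PySem.Chars.findFrom s cmdL (i + 1) none)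
      else []

def get_search_index_py_alt (command_string : String) (line : String) : List Int :=
  let cmdL := command_string.toList
  let s := line.toList
  let outside :=
    (s.foldl
      (fun (st : Bool × List Bool) (ch : Char) =>
        let inside := if ch = ')' then false else if !st.1 && ch = '(' then true else st.1
        (inside, st.2 ++ [!inside]))
      (false, [])).2
  pvAltLoop cmdL s outside (s.length + 1) (PySem.Chars.find s cmdL)

-- ===== PRECONDITION & SPEC =====
def Spec_get_search_index_py (command_string : String) (line : String) (out : List Int) : Prop := out = get_search_index_py_alt command_string line
instance (command_string : String) (line : String) (out : List Int) : Decidable (Spec_get_search_index_py command_string line out) := by unfold Spec_get_search_index_py; infer_instance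

-- ===== CLAIM (what is proved, stated in full; the proofs are below) =====
def Claim_equal_get_search_index_py : Prop := ∀ (command_string : String) (line : String), Dom_get_search_index_py command_string line → Spec_get_search_index_py command_string line (get_search_index_py command_string line)

-- ===== LEMMAS AND PROOFS =====

-- the shared bracket-state step, as B tracks it (a Bool); A's Int counter is pvBcOf of it
def pvStepB (b : Bool) (ch : Char) : Bool :=
  if ch = ')' then false else if !b && ch = '(' then true else b

def pvBcOf (b : Bool) : Int := if b then -1 else 0

-- the mask Source B builds, as a structural recursion
def pvMaskAux (b : Bool) : List Char → List Bool
  | [] => []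
  | c :: cs => (!(pvStepB b c)) :: pvMaskAux (pvStepB b c) cs

-- the common specification: index k is outside parentheses and an occurrence of cmdL starts there
def pvGood (cmdL s : List Char) (k : Nat) : Bool :=
  (pvMaskAux false s).getD k false && decide (cmdL <+: s.drop k)

def pvCollect (cmdL s : List Char) (n : Nat) (k : Nat) : List Int :=
  if _h : k < n then
    (if pvGood cmdL s k then [(k : Int)] else []) ++ pvCollect cmdL s n (k + 1)
  else []
termination_by n - k

lemma pvBcOf_step (b : Bool) (c : Char) :
    (if pvBcOf b ≠ 0 then (if c = ')' then pvBcOf b + 1 else pvBcOf b)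
     else if c = '(' then pvBcOf b - 1 else pvBcOf b) = pvBcOf (pvStepB b c) := by
  cases b <;> simp [pvBcOf, pvStepB] <;> split_ifs <;> simp_all

-- the k-th mask bit is the (negated) bracket state after consuming k+1 characters
lemma pvMask_getD (cs : List Char) : ∀ (b : Bool) (k : Nat), k < cs.length →
    (pvMaskAux b cs).getD k false = !((cs.take (k + 1)).foldl pvStepB b) := by
  induction cs with
  | nil => intro b k hk; simp at hk
  | cons c cs ih =>
    intro b k hk
    cases k with
    | zero => simp [pvMaskAux]
    | succ k =>
      simp only [pvMaskAux, List.getD_cons_succ, List.take_succ_cons, List.foldl_cons]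
      exact ih (pvStepB b c) k (by simpa using hk)

-- Source B's mask-building loop produces pvMaskAux
lemma pvMask_fold (cs : List Char) : ∀ (b : Bool) (acc : List Bool),
    (cs.foldl
      (fun (st : Bool × List Bool) (ch : Char) =>
        let inside := if ch = ')' then false else if !st.1 && ch = '(' then true else st.1
        (inside, st.2 ++ [!inside])) (b, acc)).2 = acc ++ pvMaskAux b cs := by
  induction cs with
  | nil => intro b acc; simp [pvMaskAux]
  | cons c cs ih =>
    intro b acc
    simp only [List.foldl_cons]
    rw [ih]
    simp [pvMaskAux, pvStepB]

lemma pvCollect_stop (cmdL s : List Char) (n k : Nat) (h : n ≤ k) :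
    pvCollect cmdL s n k = [] := by
  rw [pvCollect, dif_neg (by omega)]

-- positions carrying no occurrence of cmdL contribute nothing to pvCollect
lemma pvCollect_skip (cmdL s : List Char) (n : Nat) : ∀ (d lb : Nat), lb + d ≤ n →
    (∀ j, lb ≤ j → j < lb + d → ¬ cmdL <+: s.drop j) →
    pvCollect cmdL s n lb = pvCollect cmdL s n (lb + d) := by
  intro d
  induction d with
  | zero => intro lb _ _; rfl
  | succ d ih =>
    intro lb h hj
    have hlb : lb < n := by omega
    have hg : pvGood cmdL s lb = false := by
      have hnp : ¬ cmdL <+: s.drop lb := hj lb le_rfl (by omega)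
      simp [pvGood, hnp]
    rw [pvCollect, dif_pos hlb, hg]
    have harith : lb + (d + 1) = (lb + 1) + d := by omega
    rw [harith]
    simpa using ih (lb + 1) (by omega) (fun j h1 h2 => hj j (by omega) (by omega))

-- A's loop body, named (definitionally the lambda of the port)
def pvStepA (cmdL s : List Char) (st : Int × List Int) (i : Int) : Int × List Int :=
  let bc : Int :=
    if st.1 ≠ 0 then
      (if PySem.List.pyGetD s i ' ' = ')' then st.1 + 1 else st.1)
    else if PySem.List.pyGetD s i ' ' = '(' then st.1 - 1 else st.1
  if bc = 0 then
    if PySem.List.slice s (some i) (some (i + (cmdL.length : Int))) = cmdL then (bc, st.2 ++ [i])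
    else (bc, st.2)
  else (bc, st.2)

lemma pvSlice_iff (cmdL s : List Char) (k : Nat) :
    (List.take cmdL.length (List.drop k s) = cmdL) ↔ cmdL <+: List.drop k s := by
  rw [List.prefix_iff_eq_take]
  exact ⟨fun h => h.symm, fun h => h.symm⟩

lemma pvStepA_val (cmdL s : List Char) (g : Bool) (acc : List Int) (k : Nat)
    (hklt : k < s.length) :
    pvStepA cmdL s (pvBcOf g, acc) (k : Int)
      = (pvBcOf (pvStepB g s[k]),
         if pvStepB g s[k] = false ∧ cmdL <+: s.drop k then acc ++ [(k : Int)] else acc) := by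
  have hget : PySem.List.pyGetD s (k : Int) ' ' = s[k] := by
    simp [PySem.List.pyGetD_natCast, List.getD_eq_getElem?_getD, List.getElem?_eq_getElem hklt]
  unfold pvStepA
  simp only [hget]
  rw [pvBcOf_step, PySem.List.slice_natCast_add]
  cases hpv : pvStepB g s[k] with
  | false =>
    by_cases h2 : cmdL <+: List.drop k s
    · simp [pvBcOf, (pvSlice_iff cmdL s k).mpr h2, h2]
    · have hne : List.take cmdL.length (List.drop k s) ≠ cmdL :=
        fun h => h2 ((pvSlice_iff cmdL s k).mp h)
      simp [pvBcOf, hne, h2]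
  | true => simp [pvBcOf]

-- A's fused loop computes pvCollect
lemma pvA_loop (cmdL s : List Char) : ∀ (d k : Nat) (acc : List Int), k + d = s.length →
    ((PySem.List.pyRange (k : Int) (s.length : Int) 1).foldl (pvStepA cmdL s)
      (pvBcOf ((s.take k).foldl pvStepB false), acc)).2 = acc ++ pvCollect cmdL s s.length k := by
  intro d
  induction d with
  | zero =>
    intro k acc hk
    have hk' : s.length ≤ k := by omega
    rw [PySem.List.pyRange_one_eq_nil (by exact_mod_cast hk')]
    rw [pvCollect_stop cmdL s s.length k hk']
    simp
  | succ d ih =>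
    intro k acc hk
    have hklt : k < s.length := by omega
    rw [PySem.List.pyRange_one_cons (by exact_mod_cast hklt), List.foldl_cons]
    rw [pvStepA_val cmdL s _ acc k hklt]
    have hstate : (s.take (k + 1)).foldl pvStepB false
        = pvStepB ((s.take k).foldl pvStepB false) s[k] := by
      rw [List.take_succ_eq_append_getElem hklt, List.foldl_append, List.foldl_cons,
        List.foldl_nil]
    have hcast : (k : Int) + 1 = ((k + 1 : Nat) : Int) := by push_cast; ring
    rw [hcast, ← hstate]
    have hmaskk : (pvMaskAux false s).getD k false
        = !((s.take (k + 1)).foldl pvStepB false) := pvMask_getD s false k hklt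
    by_cases hC : (s.take (k + 1)).foldl pvStepB false = false ∧ cmdL <+: s.drop k
    · rw [if_pos hC, ih (k + 1) (acc ++ [(k : Int)]) (by omega)]
      have hgood : pvGood cmdL s k = true := by
        unfold pvGood; rw [hmaskk]; simp [hC.1, hC.2]
      conv_rhs => rw [pvCollect]
      rw [dif_pos hklt, hgood]
      simp
    · rw [if_neg hC, ih (k + 1) acc (by omega)]
      have hgood : pvGood cmdL s k = false := by
        unfold pvGood; rw [hmaskk]
        by_cases h1 : (s.take (k + 1)).foldl pvStepB false = false
        · have h2 : ¬ cmdL <+: s.drop k := fun hp => hC ⟨h1, hp⟩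
          simp [h1, h2]
        · have h1' : (s.take (k + 1)).foldl pvStepB false = true := by
            revert h1; cases (s.take (k + 1)).foldl pvStepB false <;> simp
          simp [h1']
      conv_rhs => rw [pvCollect]
      rw [dif_pos hklt, hgood]
      simp

-- B's find loop computes pvCollect
lemma pvB_loop (cmdL s : List Char) : ∀ (fuel lb : Nat), lb ≤ s.length →
    s.length + 1 - lb ≤ fuel →
    pvAltLoop cmdL s (pvMaskAux false s) fuel (PySem.Chars.findFrom s cmdL (lb : Int) none)
      = pvCollect cmdL s s.length lb := by
  intro fuel
  induction fuel with
  | zero => intro lb h1 h2; omega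
  | succ fuel ih =>
    intro lb hlb hfuel
    rw [PySem.Chars.findFrom_natCast s cmdL lb hlb]
    set f := PySem.Chars.find (s.drop lb) cmdL with hf
    by_cases hneg : f = -1
    · rw [if_pos hneg]
      have hnone : ∀ j, lb ≤ j → j < s.length → ¬ cmdL <+: s.drop j := by
        intro j h1 h2 hp
        have hinf : ¬ cmdL <:+: s.drop lb := (PySem.Chars.find_eq_neg_one_iff _ _).mp hneg
        apply hinf
        have hdj : s.drop j = (s.drop lb).drop (j - lb) := by
          rw [List.drop_drop]; congr 1; omega
        rw [hdj] at hp
        exact hp.isInfix.trans (List.drop_suffix _ _).isInfix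
      have hrw : pvCollect cmdL s s.length lb
          = pvCollect cmdL s s.length (lb + (s.length - lb)) := by
        apply pvCollect_skip cmdL s s.length (s.length - lb) lb (by omega)
        intro j h1 h2; exact hnone j h1 (by omega)
      rw [hrw, pvCollect_stop cmdL s s.length _ (by omega)]
      rw [pvAltLoop]
      simp
    · rw [if_neg hneg]
      have hf0 : 0 ≤ f := by
        have := PySem.Chars.neg_one_le_find (s.drop lb) cmdL
        omega
      have hfle : f ≤ ((s.drop lb).length : Int) := PySem.Chars.find_le_length (s.drop lb) cmdL
      have hspec := PySem.Chars.find_spec (s := s.drop lb) (sub := cmdL) hf0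
      set t := f.toNat with ht
      have hft : f = (t : Int) := (Int.toNat_of_nonneg hf0).symm
      have htle : lb + t ≤ s.length := by
        have hlen : (s.drop lb).length = s.length - lb := List.length_drop
        omega
      have hcast : (lb : Int) + f = ((lb + t : Nat) : Int) := by rw [hft]; push_cast; ring
      have hocc : cmdL <+: s.drop (lb + t) := by
        have h1 := hspec.1
        rwa [List.drop_drop] at h1
      have hmin : ∀ j, lb ≤ j → j < lb + t → ¬ cmdL <+: s.drop j := by
        intro j h1 h2 hp
        have h3 := hspec.2 (j - lb) (by omega)
        apply h3
        rw [List.drop_drop]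
        have hj : lb + (j - lb) = j := by omega
        rw [hj]; exact hp
      have hskip : pvCollect cmdL s s.length lb = pvCollect cmdL s s.length (lb + t) :=
        pvCollect_skip cmdL s s.length t lb htle hmin
      rw [hcast, hskip]
      by_cases hlt : lb + t < s.length
      · rw [pvAltLoop]
        rw [if_pos (show (0 : Int) ≤ ((lb + t : Nat) : Int) ∧ ((lb + t : Nat) : Int) < (s.length : Int)
          from ⟨by exact_mod_cast Nat.zero_le _, by exact_mod_cast hlt⟩)]
        have htoNat : ((lb + t : Nat) : Int).toNat = lb + t := by omega
        have hstep : ((lb + t : Nat) : Int) + 1 = ((lb + t + 1 : Nat) : Int) := by push_cast; ring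
        rw [htoNat, hstep, ih (lb + t + 1) (by omega) (by omega)]
        have hgoodEq : pvGood cmdL s (lb + t) = (pvMaskAux false s).getD (lb + t) false := by
          unfold pvGood; simp [hocc]
        conv_rhs => rw [pvCollect]
        rw [dif_pos hlt, hgoodEq]
      · have heq : lb + t = s.length := by omega
        rw [pvAltLoop]
        rw [if_neg (by rw [heq]; simp)]
        rw [pvCollect_stop cmdL s s.length _ (by omega)]

-- ===== VERDICT (by name: the statement is the Claim_ definition above) =====
theorem get_search_index_py_spec : Claim_equal_get_search_index_py := by
  intro command_string line _hdom
  unfold Spec_get_search_index_py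
  have hA : get_search_index_py command_string line
      = pvCollect command_string.toList line.toList line.toList.length 0 := by
    have hA0 : get_search_index_py command_string line
        = ((PySem.List.pyRange 0 (line.toList.length : Int) 1).foldl
            (pvStepA command_string.toList line.toList) (0, [])).2 := rfl
    rw [hA0]
    have h := pvA_loop command_string.toList line.toList line.toList.length 0 [] (by omega)
    simpa [pvBcOf] using h
  have hB : get_search_index_py_alt command_string line
      = pvCollect command_string.toList line.toList line.toList.length 0 := by
    have hB0 : get_search_index_py_alt command_string line
        = pvAltLoop command_string.toList line.toList
            ((line.toList.foldl
              (fun (st : Bool × List Bool) (ch : Char) =>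
                let inside := if ch = ')' then false else if !st.1 && ch = '(' then true else st.1
                (inside, st.2 ++ [!inside])) (false, [])).2)
            (line.toList.length + 1) (PySem.Chars.find line.toList command_string.toList) := rfl
    rw [hB0, pvMask_fold]
    have hfind : PySem.Chars.find line.toList command_string.toList
        = PySem.Chars.findFrom line.toList command_string.toList ((0 : Nat) : Int) none := by
      simp
    rw [List.nil_append, hfind]
    exact pvB_loop command_string.toList line.toList (line.toList.length + 1) 0 (by omega) (by omega)
  rw [hA, hB]
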